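-- pv_equiv track=rewrite | github.com/David-5-5/tutorial | python/algo/202408/leetcode2457.py | makeIntegerBeautiful
-- ===== SOURCE A (Python) =====
-- def makeIntegerBeautiful(n: int, target: int) -> int:
--     ns = str(n)
--     ss = sum([int(i) for i in ns])
--     ans, inx, inc = 0, len(ns) - 1, 0
--     while ss > target:
--         v = int(ns[inx]) + inc
--         if v % 10:
--             ss -= v - 1
--             inc = 1
--             ans += (10 - v) * (10 ** (len(ns)-1-inx))
--         elif v == 10:
--             ss -= 9
--             inc = 1
--         inx -= 1
--     return ans
-- ===== SOURCE B (Python) =====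
-- def makeIntegerBeautiful(n: int, target: int) -> int:
--     ns = str(n)
--     for k in range(len(ns) + 1):
--         p = 10 ** k
--         cand = (n + p - 1) // p * p   # n rounded up to a multiple of 10**k
--         if sum(int(c) for c in str(cand)) <= target:
--             return cand - n
-- ===== Notes on version B (the rewrite author's own statement) =====
-- stated objective: simpler
-- what changed: Replaces A's stateful carry loop (running digit sum, pending-carry flag, index walking the digit string) by a scan over k = 0..len(str(n)) that rounds n up to a multiple of 10**k and recomputes the candidate's digit sum from scratch, returning the first candidate whose digit sum fits.
-- outside the precondition, e.g. on makeIntegerBeautiful(-5, 3): A raises ValueError, B raises ValueError; on makeIntegerBeautiful(1, 0): A returns 89, B returns None; on makeIntegerBeautiful(1, -1): A raises IndexError, B returns None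
import Mathlib
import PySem

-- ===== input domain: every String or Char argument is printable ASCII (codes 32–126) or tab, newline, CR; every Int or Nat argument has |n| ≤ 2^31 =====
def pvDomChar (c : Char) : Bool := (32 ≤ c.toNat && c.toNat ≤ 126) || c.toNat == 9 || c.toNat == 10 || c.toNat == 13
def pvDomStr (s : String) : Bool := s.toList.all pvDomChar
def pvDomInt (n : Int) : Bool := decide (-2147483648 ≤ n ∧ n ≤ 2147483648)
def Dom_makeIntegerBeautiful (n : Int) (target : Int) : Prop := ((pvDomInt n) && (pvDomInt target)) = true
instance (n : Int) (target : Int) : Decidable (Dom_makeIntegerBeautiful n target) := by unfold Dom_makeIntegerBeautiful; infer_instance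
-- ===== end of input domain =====

-- B replaces A's stateful carry loop by a scan over k = 0..len(str(n)) that rounds n up to a
-- multiple of 10**k and recomputes the candidate's digit sum from scratch (objective: simpler).

-- ===== PORT A =====
-- int(c) for a single character c, in total form (.getD 0); exact whenever Python's int(c) returns,
-- which is the case for every character either program feeds it under Pre_.
def pvDigit (c : Char) : Int := (PySem.Int.ofChars? [c]).getD 0

-- A's while loop; fuel = len(ns)+1 bounds the number of iterations the loop performs under Pre_
-- (proved inside the main proof: it stops after at most len(ns) iterations).  The ' ' default of
-- pyGetD and the .toNat of the exponent are the usual total forms, unreached/exact under Pre_.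
def pvLoopA (ns : List Char) (target : Int) : Nat → Int → Int → Int → Int → Int
  | 0, _, ans, _, _ => ans
  | fuel + 1, ss, ans, inx, inc =>
    if ss > target then
      let v : Int := pvDigit (PySem.List.pyGetD ns inx ' ') + inc
      if PySem.Int.mod v 10 ≠ 0 then
        pvLoopA ns target fuel (ss - (v - 1))
          (ans + (10 - v) * 10 ^ (PySem.List.len ns - 1 - inx).toNat) (inx - 1) 1
      else if v = 10 then
        pvLoopA ns target fuel (ss - 9) ans (inx - 1) 1
      else
        pvLoopA ns target fuel ss ans (inx - 1) inc
    else ans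

def makeIntegerBeautiful (n : Int) (target : Int) : Int :=
  let ns := PySem.Int.toChars n
  let ss := (ns.map pvDigit).sum
  pvLoopA ns target (ns.length + 1) ss 0 (PySem.List.len ns - 1) 0

-- ===== PORT B =====
-- the 'for k in range(len(ns)+1)' scan of Source B; [] => 0 is the fall-off-the-end case
-- (Python returns None there), unreached under Pre_.
def pvLoopB (n : Int) (target : Int) : List Int → Int
  | [] => 0
  | k :: ks =>
    let p : Int := 10 ^ k.toNat
    let cand := PySem.Int.floordiv (n + p - 1) p * p
    if ((PySem.Int.toChars cand).map pvDigit).sum ≤ target then cand - n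
    else pvLoopB n target ks

def makeIntegerBeautiful_alt (n : Int) (target : Int) : Int :=
  let ns := PySem.Int.toChars n
  pvLoopB n target (PySem.List.pyRange 0 (PySem.List.len ns + 1) 1)

-- ===== PRECONDITION & SPEC =====
-- Pre_ excludes negative n, on which both programs raise ValueError (int('-')), and target ≤ 0,
-- on which A's termination and value are an accident of negative-index wraparound over the digit
-- string (or an IndexError) while B's scan finds no candidate and returns no value (None).
def Pre_makeIntegerBeautiful (n : Int) (target : Int) : Prop := 0 ≤ n ∧ 1 ≤ target
instance (n : Int) (target : Int) : Decidable (Pre_makeIntegerBeautiful n target) := by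
  unfold Pre_makeIntegerBeautiful; infer_instance
def pvWitness_makeIntegerBeautiful : Int × Int := (467, 6)

def Spec_makeIntegerBeautiful (n : Int) (target : Int) (out : Int) : Prop := out = makeIntegerBeautiful_alt n target
instance (n : Int) (target : Int) (out : Int) : Decidable (Spec_makeIntegerBeautiful n target out) := by unfold Spec_makeIntegerBeautiful; infer_instance

-- ===== CLAIM (what is proved, stated in full; the proofs are below) =====
def Claim_equal_makeIntegerBeautiful : Prop := ∀ (n : Int) (target : Int), Dom_makeIntegerBeautiful n target → Pre_makeIntegerBeautiful n target → Spec_makeIntegerBeautiful n target (makeIntegerBeautiful n target)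

-- ===== LEMMAS AND PROOFS =====

-- digit sum of a natural number, as an integer
def pvS (m : Nat) : Int := ((Nat.digits 10 m).sum : Int)

lemma pvS_zero : pvS 0 = 0 := by simp [pvS]

lemma pvS_def (m : Nat) : pvS m = ((m % 10 : Nat) : Int) + pvS (m / 10) := by
  rcases Nat.eq_zero_or_pos m with h | h
  · subst h; simp [pvS]
  · unfold pvS
    rw [Nat.digits_def' (by norm_num) h]
    push_cast [List.sum_cons]
    ring

lemma pvS_succ_of (a : Nat) (h : a % 10 ≠ 9) : pvS (a + 1) = pvS a + 1 := by
  rw [pvS_def (a + 1), pvS_def a]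
  have h1 : (a + 1) % 10 = a % 10 + 1 := by omega
  have h2 : (a + 1) / 10 = a / 10 := by omega
  rw [h1, h2]; push_cast; ring

lemma pvS_succ_le (a : Nat) : pvS (a + 1) ≤ pvS a + 1 := by
  induction a using Nat.strong_induction_on with
  | _ a ih =>
    by_cases h : a % 10 = 9
    · have h2 : (a + 1) % 10 = 0 := by omega
      have h3 : (a + 1) / 10 = a / 10 + 1 := by omega
      have hlt : a / 10 < a := by omega
      have := ih (a / 10) hlt
      rw [pvS_def (a + 1), pvS_def a, h2, h3, h]
      push_cast
      omega
    · rw [pvS_succ_of a h]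

lemma pvS_mul_pow (m j : Nat) : pvS (m * 10 ^ j) = pvS m := by
  induction j with
  | zero => simp
  | succ j ih =>
    rcases Nat.eq_zero_or_pos m with h | h
    · subst h; simp
    · have e1 : (m * 10 ^ (j + 1)) % 10 = 0 := by
        have : 10 ∣ m * 10 ^ (j + 1) := ⟨m * 10 ^ j, by ring⟩
        omega
      have e2 : (m * 10 ^ (j + 1)) / 10 = m * 10 ^ j := by
        rw [pow_succ, ← Nat.mul_assoc]
        exact Nat.mul_div_cancel _ (by norm_num)
      rw [pvS_def (m * 10 ^ (j + 1)), e1, e2, ih]; simp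

-- the characters produced by Nat.toDigits, and their parsed values
lemma pvDigit_digitChar (d : Nat) (h : d < 10) : pvDigit (Nat.digitChar d) = (d : Int) := by
  interval_cases d <;> decide

lemma toDigitsCore_eq (n : Nat) : ∀ (f : Nat) (l : List Char), 0 < n → n < f →
    Nat.toDigitsCore 10 f n l = ((Nat.digits 10 n).reverse.map Nat.digitChar) ++ l := by
  induction n using Nat.strong_induction_on with
  | _ n ih =>
    intro f l hn hf
    match f with
    | 0 => omega
    | f + 1 =>
      simp only [Nat.toDigitsCore]
      by_cases h0 : n / 10 = 0
      · rw [if_pos h0, Nat.digits_def' (by norm_num) hn, h0]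
        simp
      · rw [if_neg h0]
        rw [ih (n / 10) (by omega) f (Nat.digitChar (n % 10) :: l) (by omega) (by omega)]
        rw [Nat.digits_def' (by norm_num) hn]
        simp

lemma toDigits_eq (n : Nat) :
    Nat.toDigits 10 n = if n = 0 then ['0'] else (Nat.digits 10 n).reverse.map Nat.digitChar := by
  rcases Nat.eq_zero_or_pos n with h | h
  · subst h; rfl
  · rw [if_neg (by omega)]
    rw [Nat.toDigits, toDigitsCore_eq n (n + 1) [] h (by omega)]
    simp

lemma toChars_of_nonneg (m : Int) (h : 0 ≤ m) :
    PySem.Int.toChars m = Nat.toDigits 10 m.toNat := by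
  rw [PySem.Int.toChars, if_neg (by omega)]

lemma sum_digits_toDigits (m : Nat) : ((Nat.toDigits 10 m).map pvDigit).sum = pvS m := by
  rw [toDigits_eq]
  rcases Nat.eq_zero_or_pos m with h | h
  · subst h; simp [pvS]; decide
  · rw [if_neg (by omega)]
    rw [List.map_map]
    have h1 : List.map (pvDigit ∘ Nat.digitChar) (Nat.digits 10 m).reverse
        = List.map (fun d : Nat => (d : Int)) (Nat.digits 10 m).reverse := by
      apply List.map_congr_left
      intro d hd
      exact pvDigit_digitChar d (Nat.digits_lt_base (by norm_num) (List.mem_reverse.mp hd))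
    rw [h1, List.map_reverse, List.sum_reverse]
    unfold pvS
    exact (Nat.cast_list_sum _).symm

lemma getElem_digits (j : Nat) : ∀ (N : Nat) (h : j < (Nat.digits 10 N).length),
    (Nat.digits 10 N)[j] = N / 10 ^ j % 10 := by
  induction j with
  | zero =>
    intro N h
    have hN : 0 < N := by
      by_contra hc
      have : N = 0 := by omega
      subst this; simp at h
    have hd := Nat.digits_def' (b := 10) (by norm_num) hN
    rw [List.getElem_of_eq hd h]
    simp
  | succ j ih =>
    intro N h
    have hN : 0 < N := by
      by_contra hc
      have : N = 0 := by omega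
      subst this; simp at h
    have hd := Nat.digits_def' (b := 10) (by norm_num) hN
    have hlen : j < (Nat.digits 10 (N / 10)).length := by
      rw [hd] at h; simpa using h
    rw [List.getElem_of_eq hd h, List.getElem_cons_succ, ih (N / 10) hlen,
      Nat.div_div_eq_div_mul, ← pow_succ']

-- loop-state abstractions: after j iterations of A's loop (and at scan index j of B)
def pvInc (N j : Nat) : Int := if N % 10 ^ j = 0 then 0 else 1
def pvCeil (N j : Nat) : Nat := N / 10 ^ j + (if N % 10 ^ j = 0 then 0 else 1)
def pvCand (N j : Nat) : Int := (pvCeil N j : Int) * 10 ^ j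
def pvSS (N j : Nat) : Int := pvS (N / 10 ^ j) + pvInc N j

lemma pvInc_zero {N j : Nat} (hm : N % 10 ^ j = 0) : pvInc N j = 0 := by
  unfold pvInc; rw [if_pos hm]

lemma pvInc_one {N j : Nat} (hm : N % 10 ^ j ≠ 0) : pvInc N j = 1 := by
  unfold pvInc; rw [if_neg hm]

lemma pvCeil_zero {N j : Nat} (hm : N % 10 ^ j = 0) : pvCeil N j = N / 10 ^ j := by
  unfold pvCeil; rw [if_pos hm]; ring

lemma pvCeil_one {N j : Nat} (hm : N % 10 ^ j ≠ 0) : pvCeil N j = N / 10 ^ j + 1 := by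
  unfold pvCeil; rw [if_neg hm]

lemma mod_pow_succ_zero_iff (N j : Nat) :
    N % 10 ^ (j + 1) = 0 ↔ N % 10 ^ j = 0 ∧ N / 10 ^ j % 10 = 0 := by
  rw [← Nat.dvd_iff_mod_eq_zero, ← Nat.dvd_iff_mod_eq_zero, ← Nat.dvd_iff_mod_eq_zero]
  constructor
  · intro h
    have h1 : 10 ^ j ∣ N := dvd_trans (pow_dvd_pow 10 (by omega)) h
    refine ⟨h1, ?_⟩
    rw [Nat.dvd_div_iff_mul_dvd h1]
    rwa [pow_succ] at h
  · rintro ⟨h1, h2⟩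
    rw [Nat.dvd_div_iff_mul_dvd h1] at h2
    rwa [pow_succ]

lemma pvQ_succ (N j : Nat) : N / 10 ^ (j + 1) = N / 10 ^ j / 10 := by
  rw [Nat.div_div_eq_div_mul, ← pow_succ]

-- the three branch-step facts: how A's abstract state evolves in one iteration
lemma step_zero (N j : Nat) (hd : N / 10 ^ j % 10 = 0) (hm : N % 10 ^ j = 0) :
    pvSS N (j + 1) = pvSS N j ∧ pvCand N (j + 1) = pvCand N j ∧ pvInc N (j + 1) = pvInc N j := by
  have hm1 : N % 10 ^ (j + 1) = 0 := (mod_pow_succ_zero_iff N j).mpr ⟨hm, hd⟩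
  have hq := pvQ_succ N j
  obtain ⟨q1, hq1⟩ : ∃ q1, N / 10 ^ j / 10 = q1 := ⟨_, rfl⟩
  have h2 : N / 10 ^ j = 10 * q1 := by omega
  refine ⟨?_, ?_, ?_⟩
  · unfold pvSS
    rw [pvInc_zero hm, pvInc_zero hm1, hq, hq1, pvS_def (N / 10 ^ j), hd, hq1]
    simp
  · unfold pvCand
    rw [pvCeil_zero hm1, pvCeil_zero hm, hq, hq1, h2, pow_succ]
    push_cast
    ring
  · rw [pvInc_zero hm1, pvInc_zero hm]

lemma step_ten (N j : Nat) (hd : N / 10 ^ j % 10 = 9) (hm : N % 10 ^ j ≠ 0) :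
    pvSS N (j + 1) = pvSS N j - 9 ∧ pvCand N (j + 1) = pvCand N j ∧ pvInc N (j + 1) = 1 := by
  have hm1 : N % 10 ^ (j + 1) ≠ 0 := fun h => hm ((mod_pow_succ_zero_iff N j).mp h).1
  have hq := pvQ_succ N j
  obtain ⟨q1, hq1⟩ : ∃ q1, N / 10 ^ j / 10 = q1 := ⟨_, rfl⟩
  have h2 : N / 10 ^ j = 10 * q1 + 9 := by omega
  refine ⟨?_, ?_, pvInc_one hm1⟩
  · unfold pvSS
    rw [pvInc_one hm, pvInc_one hm1, hq, hq1, pvS_def (N / 10 ^ j), hd, hq1]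
    push_cast
    ring
  · unfold pvCand
    rw [pvCeil_one hm1, pvCeil_one hm, hq, hq1, h2, pow_succ]
    push_cast
    ring

lemma step_mid (N j : Nat) (hnot0 : ¬(N / 10 ^ j % 10 = 0 ∧ N % 10 ^ j = 0)) :
    pvSS N (j + 1) = pvSS N j - ((((N / 10 ^ j % 10 : Nat) : Int) + pvInc N j) - 1) ∧
    pvCand N (j + 1) = pvCand N j + (10 - (((N / 10 ^ j % 10 : Nat) : Int) + pvInc N j)) * 10 ^ j ∧
    pvInc N (j + 1) = 1 := by
  have hm1 : N % 10 ^ (j + 1) ≠ 0 := by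
    intro h
    rcases (mod_pow_succ_zero_iff N j).mp h with ⟨h1, h2⟩
    exact hnot0 ⟨h2, h1⟩
  have hq := pvQ_succ N j
  obtain ⟨q1, hq1⟩ : ∃ q1, N / 10 ^ j / 10 = q1 := ⟨_, rfl⟩
  obtain ⟨dd, hdd⟩ : ∃ dd, N / 10 ^ j % 10 = dd := ⟨_, rfl⟩
  have h2 : N / 10 ^ j = 10 * q1 + dd := by omega
  refine ⟨?_, ?_, pvInc_one hm1⟩
  · unfold pvSS
    rw [pvInc_one hm1, hq, hq1, pvS_def (N / 10 ^ j), hdd, hq1]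
    by_cases hm : N % 10 ^ j = 0
    · rw [pvInc_zero hm]; ring
    · rw [pvInc_one hm]; ring
  · unfold pvCand
    rw [pvCeil_one hm1, hq, hq1, hdd]
    by_cases hm : N % 10 ^ j = 0
    · rw [pvInc_zero hm, pvCeil_zero hm, h2, pow_succ]
      push_cast
      ring
    · rw [pvInc_one hm, pvCeil_one hm, h2, pow_succ]
      push_cast
      ring

-- reading A's digit string
lemma len_toChars (N : Nat) (hN : 0 < N) :
    (PySem.Int.toChars (N : Int)).length = (Nat.digits 10 N).length := by
  rw [toChars_of_nonneg _ (by positivity), Int.toNat_natCast, toDigits_eq, if_neg (by omega)]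
  simp

lemma digit_read (N : Nat) (hN : 0 < N) (j : Nat) (hj : j < (Nat.digits 10 N).length) :
    pvDigit ((PySem.Int.toChars (N : Int)).getD ((Nat.digits 10 N).length - 1 - j) ' ')
      = ((N / 10 ^ j % 10 : Nat) : Int) := by
  rw [toChars_of_nonneg _ (by positivity), Int.toNat_natCast, toDigits_eq, if_neg (by omega)]
  rw [List.getD_eq_getElem _ _ (by simpa using by omega)]
  rw [List.getElem_map, List.getElem_reverse]
  have hidx : (Nat.digits 10 N).length - 1 - ((Nat.digits 10 N).length - 1 - j) = j := by
    omega
  simp only [hidx]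
  rw [getElem_digits j N (by omega)]
  exact pvDigit_digitChar _ (by omega)

-- the quotient vanishes at index L = number of digits
lemma pvQ_len_zero (N : Nat) : N / 10 ^ (Nat.digits 10 N).length = 0 :=
  Nat.div_eq_of_lt (Nat.lt_base_pow_length_digits (by norm_num))

lemma pvS_one : pvS 1 = 1 := by
  unfold pvS
  rw [Nat.digits_def' (b := 10) (by norm_num) (by norm_num)]
  simp

lemma pvSceil_le_pvSS (N i : Nat) : pvS (pvCeil N i) ≤ pvSS N i := by
  by_cases hm : N % 10 ^ i = 0
  · rw [pvCeil_zero hm]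
    unfold pvSS
    rw [pvInc_zero hm]
    simp
  · rw [pvCeil_one hm]
    unfold pvSS
    rw [pvInc_one hm]
    exact pvS_succ_le _

-- A's while loop, run from abstract state j, returns the state-jstar answer
lemma loopA_eq (N : Nat) (target : Int) (hN : 0 < N) (jstar : Nat)
    (hP : pvSS N jstar ≤ target)
    (hmin : ∀ i, i < jstar → target < pvSS N i)
    (hjL : jstar ≤ (Nat.digits 10 N).length) :
    ∀ fuel j, j ≤ jstar → jstar - j < fuel →
      pvLoopA (PySem.Int.toChars (N : Int)) target fuel (pvSS N j) (pvCand N j - (N : Int))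
        (((Nat.digits 10 N).length : Int) - 1 - (j : Int)) (pvInc N j)
        = pvCand N jstar - (N : Int) := by
  intro fuel
  induction fuel with
  | zero => intro j _ h; omega
  | succ fuel ih =>
    intro j hj hfuel
    rcases Nat.eq_or_lt_of_le hj with heq | hlt
    · subst heq
      rw [pvLoopA, if_neg (by omega)]
    · have hguard : pvSS N j > target := hmin j hlt
      have hjlen : j < (Nat.digits 10 N).length := by omega
      rw [pvLoopA, if_pos hguard]
      have hlen2 : PySem.List.len (PySem.Int.toChars (N : Int))
          = ((Nat.digits 10 N).length : Int) := by
        rw [PySem.List.len_eq, len_toChars N hN]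
      have hidx : ((Nat.digits 10 N).length : Int) - 1 - (j : Int)
          = (((Nat.digits 10 N).length - 1 - j : Nat) : Int) := by omega
      rw [hidx, PySem.List.pyGetD_natCast, digit_read N hN j hjlen]
      have hexp : PySem.List.len (PySem.Int.toChars (N : Int)) - 1 -
          (((Nat.digits 10 N).length - 1 - j : Nat) : Int) = (j : Int) := by
        rw [hlen2]; omega
      rw [hexp, Int.toNat_natCast]
      have hidx2 : (((Nat.digits 10 N).length - 1 - j : Nat) : Int) - 1
          = ((Nat.digits 10 N).length : Int) - 1 - ((j + 1 : Nat) : Int) := by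
        push_cast; omega
      rw [hidx2]
      have hdlt : N / 10 ^ j % 10 < 10 := Nat.mod_lt _ (by norm_num)
      have hinc01 : pvInc N j = 0 ∨ pvInc N j = 1 := by
        unfold pvInc; split <;> simp
      have hinc0 : pvInc N j = 0 ↔ N % 10 ^ j = 0 := by
        unfold pvInc; split <;> simp_all
      have hmodv : PySem.Int.mod (((N / 10 ^ j % 10 : Nat) : Int) + pvInc N j) 10
          = (((N / 10 ^ j % 10 : Nat) : Int) + pvInc N j) % 10 :=
        PySem.Int.mod_eq_emod_of_pos (by norm_num)
      by_cases hb1 : PySem.Int.mod (((N / 10 ^ j % 10 : Nat) : Int) + pvInc N j) 10 ≠ 0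
      · rw [if_pos hb1]
        rw [hmodv] at hb1
        have hvrange : 1 ≤ ((N / 10 ^ j % 10 : Nat) : Int) + pvInc N j ∧
            ((N / 10 ^ j % 10 : Nat) : Int) + pvInc N j ≤ 9 := by
          rcases hinc01 with h | h <;> rw [h] at hb1 ⊢ <;> omega
        obtain ⟨hst1, hst2, hst3⟩ := step_mid N j
          (by
            rintro ⟨ha, hb⟩
            rw [ha, hinc0.mpr hb] at hvrange
            simp at hvrange)
        have IH := ih (j + 1) (by omega) (by omega)
        rw [hst1, hst2, hst3] at IH
        have harr : pvCand N j + (10 - (((N / 10 ^ j % 10 : Nat) : Int) + pvInc N j)) * 10 ^ j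
            - (N : Int)
            = pvCand N j - (N : Int)
              + (10 - (((N / 10 ^ j % 10 : Nat) : Int) + pvInc N j)) * 10 ^ j := by ring
        rw [harr] at IH
        exact IH
      · rw [if_neg hb1]
        rw [not_not, hmodv] at hb1
        by_cases hb2 : ((N / 10 ^ j % 10 : Nat) : Int) + pvInc N j = 10
        · rw [if_pos hb2]
          have hI1 : pvInc N j = 1 := by
            rcases hinc01 with h | h
            · exfalso; rw [h] at hb2; omega
            · exact h
          have hd9 : N / 10 ^ j % 10 = 9 := by
            rw [hI1] at hb2; omega
          have hm : N % 10 ^ j ≠ 0 := by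
            intro hc; rw [hinc0.mpr hc] at hI1; norm_num at hI1
          obtain ⟨hst1, hst2, hst3⟩ := step_ten N j hd9 hm
          have IH := ih (j + 1) (by omega) (by omega)
          rw [hst1, hst2, hst3] at IH
          exact IH
        · rw [if_neg hb2]
          have hI0 : pvInc N j = 0 := by
            rcases hinc01 with h | h
            · exact h
            · exfalso; rw [h] at hb1 hb2; omega
          have hd0 : N / 10 ^ j % 10 = 0 := by
            rw [hI0] at hb1; omega
          obtain ⟨hst1, hst2, hst3⟩ := step_zero N j hd0 (hinc0.mp hI0)
          have IH := ih (j + 1) (by omega) (by omega)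
          rw [hst1, hst2, hst3] at IH
          exact IH

-- Source B's rounded-up candidate is pvCand
lemma ceil_div (N : Nat) (j : Nat) :
    PySem.Int.floordiv ((N : Int) + 10 ^ j - 1) (10 ^ j) * 10 ^ j = pvCand N j := by
  have hpn : 0 < 10 ^ j := by positivity
  rw [PySem.Int.floordiv_eq_ediv_of_pos (by positivity)]
  have hcast : (N : Int) + 10 ^ j - 1 = ((N + 10 ^ j - 1 : Nat) : Int) := by
    push_cast [Nat.cast_sub (by omega : 1 ≤ N + 10 ^ j)]
    ring
  have hcast2 : ((10 : Int)) ^ j = ((10 ^ j : Nat) : Int) := by push_cast; ring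
  have key : (N + 10 ^ j - 1) / 10 ^ j = pvCeil N j := by
    by_cases hm : N % 10 ^ j = 0
    · rw [pvCeil_zero hm]
      obtain ⟨k, hk⟩ : 10 ^ j ∣ N := Nat.dvd_of_mod_eq_zero hm
      subst hk
      rw [Nat.mul_div_cancel_left k hpn]
      have h3 : 10 ^ j * k + 10 ^ j - 1 = 10 ^ j * k + (10 ^ j - 1) := by omega
      rw [h3, Nat.mul_add_div hpn, Nat.div_eq_of_lt (by omega)]
      ring
    · rw [pvCeil_one hm]
      have hmlt := Nat.mod_lt N hpn
      have hsplit := Nat.div_add_mod N (10 ^ j)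
      have hexpand : 10 ^ j * (N / 10 ^ j + 1) = 10 ^ j * (N / 10 ^ j) + 10 ^ j := by ring
      have h1 : N + 10 ^ j - 1 = 10 ^ j * (N / 10 ^ j + 1) + (N % 10 ^ j - 1) := by
        rw [hexpand]; omega
      have hz2 : (N % 10 ^ j - 1) / 10 ^ j = 0 := Nat.div_eq_of_lt (by omega)
      rw [h1, Nat.mul_add_div hpn, hz2]
  rw [hcast, hcast2, ← Int.natCast_div, key]
  unfold pvCand
  push_cast
  ring

lemma sumB (c : Int) (hc : 0 ≤ c) :
    ((PySem.Int.toChars c).map pvDigit).sum = pvS c.toNat := by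
  rw [toChars_of_nonneg c hc, sum_digits_toDigits]

-- B's scan, started at index j, returns the state-kstar answer
lemma loopB_eq (N : Nat) (target : Int) (L kstar : Nat)
    (hP : pvS (pvCeil N kstar) ≤ target)
    (hmin : ∀ i, i < kstar → target < pvS (pvCeil N i))
    (hkL : kstar ≤ L) :
    ∀ m j, kstar - j = m → j ≤ kstar →
      pvLoopB (N : Int) target (PySem.List.pyRange (j : Int) ((L : Int) + 1) 1)
        = pvCand N kstar - (N : Int) := by
  intro m
  induction m with
  | zero =>
    intro j hm hj
    have hj' : j = kstar := by omega
    subst hj'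
    rw [PySem.List.pyRange_one_cons (by push_cast; omega), pvLoopB]
    simp only [Int.toNat_natCast]
    rw [ceil_div N j]
    have hc : pvCand N j = ((pvCeil N j * 10 ^ j : Nat) : Int) := by
      unfold pvCand; push_cast; ring
    rw [hc, sumB _ (Int.natCast_nonneg _), Int.toNat_natCast, pvS_mul_pow]
    rw [if_pos hP, ← hc]
  | succ m ih =>
    intro j hm hj
    have hjk : j < kstar := by omega
    rw [PySem.List.pyRange_one_cons (by push_cast; omega), pvLoopB]
    simp only [Int.toNat_natCast]
    rw [ceil_div N j]
    have hc : pvCand N j = ((pvCeil N j * 10 ^ j : Nat) : Int) := by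
      unfold pvCand; push_cast; ring
    rw [hc, sumB _ (Int.natCast_nonneg _), Int.toNat_natCast, pvS_mul_pow]
    rw [if_neg (not_le.mpr (hmin j hjk))]
    have hstep : ((j : Int) + 1) = ((j + 1 : Nat) : Int) := by push_cast; ring
    rw [hstep]
    exact ih (j + 1) (by omega) (by omega)

-- between kstar and jstar the candidate (and its digit sum) does not move
lemma bridge (N : Nat) (target : Int) (kstar jstar : Nat)
    (hPk : pvS (pvCeil N kstar) ≤ target)
    (hminj : ∀ i, i < jstar → target < pvSS N i) :
    ∀ j, kstar ≤ j → j ≤ jstar →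
      pvCand N j = pvCand N kstar ∧ pvS (pvCeil N j) ≤ target := by
  intro j
  induction j with
  | zero =>
    intro h1 _
    have hk0 : kstar = 0 := by omega
    rw [hk0] at hPk ⊢
    exact ⟨rfl, hPk⟩
  | succ j ihj =>
    intro h1 h2
    rcases Nat.eq_or_lt_of_le h1 with heq | hlt
    · rw [← heq]; exact ⟨rfl, hPk⟩
    · have hj1 : kstar ≤ j := by omega
      obtain ⟨hcand, hple⟩ := ihj hj1 (by omega)
      have hss : target < pvSS N j := hminj j (by omega)
      have hm : N % 10 ^ j ≠ 0 := by
        intro hm0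
        have : pvS (pvCeil N j) = pvSS N j := by
          rw [pvCeil_zero hm0]
          unfold pvSS
          rw [pvInc_zero hm0]
          simp
        omega
      have hd9 : N / 10 ^ j % 10 = 9 := by
        by_contra hd
        have h3 := pvS_succ_of (N / 10 ^ j) hd
        rw [pvCeil_one hm] at hple
        have h4 : pvSS N j = pvS (N / 10 ^ j) + 1 := by
          unfold pvSS; rw [pvInc_one hm]
        omega
      obtain ⟨hst1, hst2, hst3⟩ := step_ten N j hd9 hm
      refine ⟨by rw [hst2, hcand], ?_⟩
      have hm1 : N % 10 ^ (j + 1) ≠ 0 :=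
        fun h => hm ((mod_pow_succ_zero_iff N j).mp h).1
      have hceil1 : pvCeil N (j + 1) = N / 10 ^ j / 10 + 1 := by
        rw [pvCeil_one hm1, pvQ_succ]
      have hkey : pvS (pvCeil N j) = pvS (pvCeil N (j + 1)) := by
        rw [pvCeil_one hm, hceil1]
        have hsplit : N / 10 ^ j + 1 = (N / 10 ^ j / 10 + 1) * 10 ^ 1 := by omega
        rw [hsplit, pvS_mul_pow]
      omega

-- ===== VERDICT (by name: the statement is the Claim_ definition above) =====
theorem makeIntegerBeautiful_spec : Claim_equal_makeIntegerBeautiful := by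
  intro n target _ hpre
  obtain ⟨hn, ht⟩ := hpre
  unfold Spec_makeIntegerBeautiful
  obtain ⟨N, rfl⟩ : ∃ N : Nat, n = (N : Int) := ⟨n.toNat, by omega⟩
  rcases Nat.eq_zero_or_pos N with hN0 | hNpos
  · -- n = 0: both sides return 0
    subst hN0
    have hch : PySem.Int.toChars ((0 : Nat) : Int) = ['0'] := by decide
    have hB : makeIntegerBeautiful_alt ((0 : Nat) : Int) target = 0 := by
      have hP0 : pvS (pvCeil 0 0) ≤ target := by
        have : pvCeil 0 0 = 0 := by decide
        rw [this, pvS_zero]; omega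
      have hL := loopB_eq 0 target 1 0 hP0 (by omega) (by omega) 0 0 rfl (by omega)
      have hcand0 : pvCand 0 0 = 0 := by decide
      rw [hcand0] at hL
      simp only [makeIntegerBeautiful_alt]
      rw [hch]
      have hrange : PySem.List.pyRange 0 (PySem.List.len ['0'] + 1) 1
          = PySem.List.pyRange (((0 : Nat) : Int)) (((1 : Nat) : Int) + 1) 1 := by decide
      rw [hrange, hL]
      simp
    rw [hB]
    simp only [makeIntegerBeautiful]
    rw [hch]
    have hsum : ((['0'] : List Char).map pvDigit).sum = 0 := by decide
    rw [hsum, pvLoopA, if_neg (by omega)]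
  · -- N > 0
    have hQL := pvQ_len_zero N
    have hL1 : pvSS N (Nat.digits 10 N).length ≤ target := by
      unfold pvSS pvInc
      rw [hQL, pvS_zero]
      split <;> omega
    have hL2 : pvS (pvCeil N (Nat.digits 10 N).length) ≤ target := by
      unfold pvCeil
      rw [hQL]
      split
      · rw [Nat.zero_add, pvS_zero]; omega
      · rw [Nat.zero_add, pvS_one]; omega
    have hex1 : ∃ j, pvSS N j ≤ target := ⟨_, hL1⟩
    have hex2 : ∃ k, pvS (pvCeil N k) ≤ target := ⟨_, hL2⟩
    set jstar := Nat.find hex1 with hjdef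
    set kstar := Nat.find hex2 with hkdef
    have hPj : pvSS N jstar ≤ target := Nat.find_spec hex1
    have hPk : pvS (pvCeil N kstar) ≤ target := Nat.find_spec hex2
    have hminj : ∀ i, i < jstar → target < pvSS N i :=
      fun i hi => lt_of_not_ge (Nat.find_min hex1 hi)
    have hmink : ∀ i, i < kstar → target < pvS (pvCeil N i) :=
      fun i hi => lt_of_not_ge (Nat.find_min hex2 hi)
    have hjL : jstar ≤ (Nat.digits 10 N).length := Nat.find_min' hex1 hL1
    have hkL : kstar ≤ (Nat.digits 10 N).length := Nat.find_min' hex2 hL2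
    have hkj : kstar ≤ jstar := by
      by_contra hc
      have h5 := hmink jstar (by omega)
      have h6 := pvSceil_le_pvSS N jstar
      omega
    -- A's loop lands on jstar's state
    have hA : makeIntegerBeautiful (N : Int) target = pvCand N jstar - (N : Int) := by
      simp only [makeIntegerBeautiful]
      have hss0 : ((PySem.Int.toChars (N : Int)).map pvDigit).sum = pvSS N 0 := by
        rw [sumB _ (Int.natCast_nonneg _), Int.toNat_natCast]
        unfold pvSS
        rw [pvInc_zero (by rw [pow_zero, Nat.mod_one]), pow_zero, Nat.div_one]
        ring
      have hz : (0 : Int) = pvCand N 0 - (N : Int) := by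
        unfold pvCand
        rw [pvCeil_zero (by rw [pow_zero, Nat.mod_one]), pow_zero, Nat.div_one]
        ring
      have hix : PySem.List.len (PySem.Int.toChars (N : Int)) - 1
          = ((Nat.digits 10 N).length : Int) - 1 - ((0 : Nat) : Int) := by
        rw [PySem.List.len_eq, len_toChars N hNpos]
        push_cast; ring
      have hfuel : (PySem.Int.toChars (N : Int)).length + 1
          = (Nat.digits 10 N).length + 1 := by rw [len_toChars N hNpos]
      have hI0 : pvInc N 0 = 0 := pvInc_zero (by rw [pow_zero, Nat.mod_one])
      have HL := loopA_eq N target hNpos jstar hPj hminj hjL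
        ((Nat.digits 10 N).length + 1) 0 (by omega) (by omega)
      rw [← hss0, ← hz, ← hix, ← hfuel, hI0] at HL
      exact HL
    -- B's scan lands on kstar's state
    have hB : makeIntegerBeautiful_alt (N : Int) target = pvCand N kstar - (N : Int) := by
      simp only [makeIntegerBeautiful_alt]
      have hlen : PySem.List.len (PySem.Int.toChars (N : Int)) + 1
          = (((Nat.digits 10 N).length : Nat) : Int) + 1 := by
        rw [PySem.List.len_eq, len_toChars N hNpos]
      have h0 : (0 : Int) = ((0 : Nat) : Int) := by norm_num
      rw [hlen, h0]
      exact loopB_eq N target (Nat.digits 10 N).length kstar hPk hmink hkL kstar 0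
        (by omega) (by omega)
    obtain ⟨hcc, _⟩ := bridge N target kstar jstar hPk hminj jstar hkj (le_refl _)
    rw [hA, hB, hcc]
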